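-- pv_equiv track=rewrite | github.com/Maxmunzy/valorant_patch_verdfict | parse_patch_text.py | infer_stat
-- ===== SOURCE A (Python) =====
-- def infer_stat(label: str) -> str:
--     ll = label.lower()
--     # multiplier 먼저 (ult_cost보다 우선)
--     if any(w in ll for w in ["multiplier", "multi", "mult"]):
--         return "multiplier"
--     if any(w in ll for w in ["duration", "time", "window", "active", "uptime"]):
--         return "duration"
--     # "ultimate cost" / "ult cost" 는 ult_cost로 먼저 처리
--     if any(w in ll for w in ["ult cost", "ultimate cost"]):
--         return "ult_cost"
--     if any(w in ll for w in ["cost", "credit", "price"]):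
--         return "cost"
--     if "charge" in ll:
--         return "charges"
--     if any(w in ll for w in ["damage", "dmg", "dps", "tick"]):
--         return "damage"
--     if any(w in ll for w in ["health", "hp", "heal"]):
--         return "health"
--     if "cooldown" in ll:
--         return "cooldown"
--     if any(w in ll for w in ["range", "radius", "distance", "size", "diameter", "length", "width", "height", "killzone", "zone"]):
--         return "range"
--     if any(w in ll for w in ["ult", "ultimate", "point"]) and "cost" not in ll:
--         return "ult_cost"
--     if any(w in ll for w in ["speed", "velocity"]):
--         return "speed"
--     if "delay" in ll:
--         return "delay"
--     if "fortif" in ll: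
--         return "fortify_delay"
--     if "degree" in ll or "vision" in ll or "angle" in ll:
--         return "range"
--     return "other"
-- ===== SOURCE B (Python) =====
-- # B: no rule cascade -- every keyword carries a priority index; take the minimum
-- # priority among all keywords occurring in the label and map it to a category.
-- # The original "and 'cost' not in ll" guard on the ult rule is subsumed: if
-- # "cost" occurs, the keyword "cost" itself matches at priority 3 < 9, so the
-- # minimum can never land on the ult rule.
--
-- CATS = ["multiplier", "duration", "ult_cost", "cost", "charges", "damage",
--         "health", "cooldown", "range", "ult_cost", "speed", "delay",
--         "fortify_delay", "range"]
--
-- KEYWORDS = {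
--     "multiplier": 0, "multi": 0, "mult": 0,
--     "duration": 1, "time": 1, "window": 1, "active": 1, "uptime": 1,
--     "ult cost": 2, "ultimate cost": 2,
--     "cost": 3, "credit": 3, "price": 3,
--     "charge": 4,
--     "damage": 5, "dmg": 5, "dps": 5, "tick": 5,
--     "health": 6, "hp": 6, "heal": 6,
--     "cooldown": 7,
--     "range": 8, "radius": 8, "distance": 8, "size": 8, "diameter": 8,
--     "length": 8, "width": 8, "height": 8, "killzone": 8, "zone": 8,
--     "ult": 9, "ultimate": 9, "point": 9,
--     "speed": 10, "velocity": 10,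
--     "delay": 11,
--     "fortif": 12,
--     "degree": 13, "vision": 13, "angle": 13,
-- }
--
--
-- def infer_stat(label: str) -> str:
--     ll = label.lower()
--     i = min((p for w, p in KEYWORDS.items() if w in ll), default=len(CATS))
--     return CATS[i] if i < len(CATS) else "other"
-- ===== Notes on version B (the rewrite author's own statement) =====
-- stated objective: alternative
-- what changed: Replaces the ordered if-cascade (with its not-in guard on the ult rule) by a flat keyword-to-priority map: B takes the minimum priority among all keywords occurring in the label and indexes a category table; the guard is subsumed because the guarding keyword is itself in the map at a smaller priority than the ult rule.
import Mathlib
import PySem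

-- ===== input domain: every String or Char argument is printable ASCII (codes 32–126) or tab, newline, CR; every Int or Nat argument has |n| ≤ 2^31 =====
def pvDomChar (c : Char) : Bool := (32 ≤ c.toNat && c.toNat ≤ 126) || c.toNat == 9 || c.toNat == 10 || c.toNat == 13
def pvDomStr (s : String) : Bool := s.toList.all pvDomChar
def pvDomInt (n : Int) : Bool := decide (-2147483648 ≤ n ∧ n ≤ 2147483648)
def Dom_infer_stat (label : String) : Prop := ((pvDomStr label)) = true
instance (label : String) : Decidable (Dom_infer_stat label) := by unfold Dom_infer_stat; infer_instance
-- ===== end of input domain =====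

-- B replaces A's ordered if-cascade by a flat keyword→priority map: the minimum
-- priority among matching keywords indexes a category table (objective: alternative).


-- ===== PORT A =====
def infer_stat (label : String) : String :=
  let ll := PySem.Str.lower label
  if ["multiplier", "multi", "mult"].any (fun w => PySem.Str.isIn w ll) then "multiplier"
  else if ["duration", "time", "window", "active", "uptime"].any (fun w => PySem.Str.isIn w ll) then "duration"
  else if ["ult cost", "ultimate cost"].any (fun w => PySem.Str.isIn w ll) then "ult_cost"
  else if ["cost", "credit", "price"].any (fun w => PySem.Str.isIn w ll) then "cost"
  else if PySem.Str.isIn "charge" ll then "charges"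
  else if ["damage", "dmg", "dps", "tick"].any (fun w => PySem.Str.isIn w ll) then "damage"
  else if ["health", "hp", "heal"].any (fun w => PySem.Str.isIn w ll) then "health"
  else if PySem.Str.isIn "cooldown" ll then "cooldown"
  else if ["range", "radius", "distance", "size", "diameter", "length", "width", "height", "killzone", "zone"].any (fun w => PySem.Str.isIn w ll) then "range"
  else if (["ult", "ultimate", "point"].any (fun w => PySem.Str.isIn w ll)) && !(PySem.Str.isIn "cost" ll) then "ult_cost"
  else if ["speed", "velocity"].any (fun w => PySem.Str.isIn w ll) then "speed"
  else if PySem.Str.isIn "delay" ll then "delay"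
  else if PySem.Str.isIn "fortif" ll then "fortify_delay"
  else if PySem.Str.isIn "degree" ll || PySem.Str.isIn "vision" ll || PySem.Str.isIn "angle" ll then "range"
  else "other"

-- ===== PORT B =====
-- category table, indexed by priority
def pvCats : List String :=
  ["multiplier", "duration", "ult_cost", "cost", "charges", "damage",
   "health", "cooldown", "range", "ult_cost", "speed", "delay",
   "fortify_delay", "range"]

-- keyword → priority map (insertion order of Source B's dict)
def pvKeywords : List (String × Nat) :=
  [("multiplier", 0), ("multi", 0), ("mult", 0),
   ("duration", 1), ("time", 1), ("window", 1), ("active", 1), ("uptime", 1),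
   ("ult cost", 2), ("ultimate cost", 2),
   ("cost", 3), ("credit", 3), ("price", 3),
   ("charge", 4),
   ("damage", 5), ("dmg", 5), ("dps", 5), ("tick", 5),
   ("health", 6), ("hp", 6), ("heal", 6),
   ("cooldown", 7),
   ("range", 8), ("radius", 8), ("distance", 8), ("size", 8), ("diameter", 8),
   ("length", 8), ("width", 8), ("height", 8), ("killzone", 8), ("zone", 8),
   ("ult", 9), ("ultimate", 9), ("point", 9),
   ("speed", 10), ("velocity", 10),
   ("delay", 11),
   ("fortif", 12),
   ("degree", 13), ("vision", 13), ("angle", 13)]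

-- min(generator with filter, default=14): fold min over the filtered priorities
def pvMinPrio (ll : String) : Nat :=
  (pvKeywords.filterMap (fun wp => if PySem.Str.isIn wp.1 ll then some wp.2 else none)).foldl min 14

def infer_stat_alt (label : String) : String :=
  let i := pvMinPrio (PySem.Str.lower label)
  if i < 14 then pvCats.getD i "other" else "other"

-- ===== PRECONDITION & SPEC =====
def Spec_infer_stat (label : String) (out : String) : Prop := out = infer_stat_alt label
instance (label : String) (out : String) : Decidable (Spec_infer_stat label out) := by unfold Spec_infer_stat; infer_instance

-- ===== CLAIM (what is proved, stated in full; the proofs are below) =====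
def Claim_equal_infer_stat : Prop := ∀ (label : String), Dom_infer_stat label → Spec_infer_stat label (infer_stat label)

-- ===== LEMMAS AND PROOFS =====

theorem foldl_min_le_init (l : List Nat) (init : Nat) : l.foldl min init ≤ init := by
  induction l generalizing init with
  | nil => simp
  | cons a t ih => exact le_trans (ih (min init a)) (min_le_left _ _)

theorem foldl_min_le (l : List Nat) (init p : Nat) (h : p ∈ l) : l.foldl min init ≤ p := by
  induction l generalizing init with
  | nil => cases h
  | cons a t ih =>
    rcases List.mem_cons.mp h with rfl | h'
    · exact le_trans (foldl_min_le_init t (min init p)) (min_le_right _ _)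
    · exact ih _ h'


theorem le_foldl_min (l : List Nat) (init k : Nat) (h : ∀ p ∈ l, k ≤ p) (hi : k ≤ init) :
    k ≤ l.foldl min init := by
  induction l generalizing init with
  | nil => exact hi
  | cons a t ih =>
    exact ih _ (fun p hp => h p (List.mem_cons_of_mem _ hp))
      (le_min hi (h a (List.mem_cons_self)))

-- pvMinPrio ll = k when some priority-k keyword matches and no keyword of
-- smaller priority does
theorem pvMinPrio_eq (ll : String) (k : Nat)
    (hex : ∃ wp ∈ pvKeywords, PySem.Str.isIn wp.1 ll = true ∧ wp.2 = k)
    (hmin : ∀ wp ∈ pvKeywords, PySem.Str.isIn wp.1 ll = true → k ≤ wp.2)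
    (hk : k ≤ 14) : pvMinPrio ll = k := by
  obtain ⟨wp, hmem, hin, hpk⟩ := hex
  apply le_antisymm
  · apply foldl_min_le
    rw [List.mem_filterMap]
    exact ⟨wp, hmem, by rw [if_pos hin, hpk]⟩
  · apply le_foldl_min _ _ _ _ hk
    intro p hp
    rw [List.mem_filterMap] at hp
    obtain ⟨wq, hq, hqe⟩ := hp
    by_cases h : PySem.Str.isIn wq.1 ll = true
    · rw [if_pos h] at hqe
      exact (Option.some.injEq _ _ ▸ hqe) ▸ hmin wq hq h
    · rw [if_neg h] at hqe
      simp at hqe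

theorem pvMinPrio_none (ll : String)
    (h : ∀ wp ∈ pvKeywords, PySem.Str.isIn wp.1 ll = false) : pvMinPrio ll = 14 := by
  unfold pvMinPrio
  have : pvKeywords.filterMap (fun wp => if PySem.Str.isIn wp.1 ll then some wp.2 else none) = [] := by
    rw [List.filterMap_eq_nil_iff]
    intro wp hwp
    have hw := h wp hwp
    simp only [hw, Bool.false_eq_true, if_false]
  rw [this]; rfl

-- infer_stat_alt without the index guard: getD's default covers the no-match index 14
theorem alt_eq (label : String) :
    infer_stat_alt label = pvCats.getD (pvMinPrio (PySem.Str.lower label)) "other" := by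
  unfold infer_stat_alt
  by_cases h : pvMinPrio (PySem.Str.lower label) < 14
  · simp only [h, if_true]
  · simp only [h, if_false]
    rw [List.getD_eq_default]
    simp only [pvCats, List.length_cons, List.length_nil]
    omega

-- ===== VERDICT (by name: the statement is the Claim_ definition above) =====
set_option maxHeartbeats 1000000 in
theorem infer_stat_spec : Claim_equal_infer_stat := by
  intro label _
  show infer_stat label = infer_stat_alt label
  refine Eq.trans ?_ (alt_eq label).symm
  unfold infer_stat
  simp only [List.any_cons, List.any_nil, Bool.or_false]
  generalize e0 : PySem.Str.isIn "multiplier" (PySem.Str.lower label) = b0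
  generalize e1 : PySem.Str.isIn "multi" (PySem.Str.lower label) = b1
  generalize e2 : PySem.Str.isIn "mult" (PySem.Str.lower label) = b2
  generalize e3 : PySem.Str.isIn "duration" (PySem.Str.lower label) = b3
  generalize e4 : PySem.Str.isIn "time" (PySem.Str.lower label) = b4
  generalize e5 : PySem.Str.isIn "window" (PySem.Str.lower label) = b5
  generalize e6 : PySem.Str.isIn "active" (PySem.Str.lower label) = b6
  generalize e7 : PySem.Str.isIn "uptime" (PySem.Str.lower label) = b7
  generalize e8 : PySem.Str.isIn "ult cost" (PySem.Str.lower label) = b8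
  generalize e9 : PySem.Str.isIn "ultimate cost" (PySem.Str.lower label) = b9
  generalize e10 : PySem.Str.isIn "cost" (PySem.Str.lower label) = b10
  generalize e11 : PySem.Str.isIn "credit" (PySem.Str.lower label) = b11
  generalize e12 : PySem.Str.isIn "price" (PySem.Str.lower label) = b12
  generalize e13 : PySem.Str.isIn "charge" (PySem.Str.lower label) = b13
  generalize e14 : PySem.Str.isIn "damage" (PySem.Str.lower label) = b14
  generalize e15 : PySem.Str.isIn "dmg" (PySem.Str.lower label) = b15
  generalize e16 : PySem.Str.isIn "dps" (PySem.Str.lower label) = b16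
  generalize e17 : PySem.Str.isIn "tick" (PySem.Str.lower label) = b17
  generalize e18 : PySem.Str.isIn "health" (PySem.Str.lower label) = b18
  generalize e19 : PySem.Str.isIn "hp" (PySem.Str.lower label) = b19
  generalize e20 : PySem.Str.isIn "heal" (PySem.Str.lower label) = b20
  generalize e21 : PySem.Str.isIn "cooldown" (PySem.Str.lower label) = b21
  generalize e22 : PySem.Str.isIn "range" (PySem.Str.lower label) = b22
  generalize e23 : PySem.Str.isIn "radius" (PySem.Str.lower label) = b23
  generalize e24 : PySem.Str.isIn "distance" (PySem.Str.lower label) = b24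
  generalize e25 : PySem.Str.isIn "size" (PySem.Str.lower label) = b25
  generalize e26 : PySem.Str.isIn "diameter" (PySem.Str.lower label) = b26
  generalize e27 : PySem.Str.isIn "length" (PySem.Str.lower label) = b27
  generalize e28 : PySem.Str.isIn "width" (PySem.Str.lower label) = b28
  generalize e29 : PySem.Str.isIn "height" (PySem.Str.lower label) = b29
  generalize e30 : PySem.Str.isIn "killzone" (PySem.Str.lower label) = b30
  generalize e31 : PySem.Str.isIn "zone" (PySem.Str.lower label) = b31
  generalize e32 : PySem.Str.isIn "ult" (PySem.Str.lower label) = b32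
  generalize e33 : PySem.Str.isIn "ultimate" (PySem.Str.lower label) = b33
  generalize e34 : PySem.Str.isIn "point" (PySem.Str.lower label) = b34
  generalize e35 : PySem.Str.isIn "speed" (PySem.Str.lower label) = b35
  generalize e36 : PySem.Str.isIn "velocity" (PySem.Str.lower label) = b36
  generalize e37 : PySem.Str.isIn "delay" (PySem.Str.lower label) = b37
  generalize e38 : PySem.Str.isIn "fortif" (PySem.Str.lower label) = b38
  generalize e39 : PySem.Str.isIn "degree" (PySem.Str.lower label) = b39
  generalize e40 : PySem.Str.isIn "vision" (PySem.Str.lower label) = b40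
  generalize e41 : PySem.Str.isIn "angle" (PySem.Str.lower label) = b41
  by_cases h0 : (b0 || (b1 || b2)) = true
  · rw [if_pos h0]
    have hmin : ∀ wp ∈ pvKeywords, PySem.Str.isIn wp.1 (PySem.Str.lower label) = true → 0 ≤ wp.2 := by
      simp only [pvKeywords, List.forall_mem_cons, List.forall_mem_nil, e0, e1, e2, e3, e4, e5, e6, e7, e8, e9, e10, e11, e12, e13, e14, e15, e16, e17, e18, e19, e20, e21, e22, e23, e24, e25, e26, e27, e28, e29, e30, e31, e32, e33, e34, e35, e36, e37, e38, e39, e40, e41]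
      simp_all
    simp only [Bool.or_eq_true] at h0
    rcases h0 with h | h | h
    · rw [pvMinPrio_eq (PySem.Str.lower label) 0 ⟨("multiplier", 0), by simp [pvKeywords], by rw [e0]; exact h, rfl⟩ hmin (by omega)]; rfl
    · rw [pvMinPrio_eq (PySem.Str.lower label) 0 ⟨("multi", 0), by simp [pvKeywords], by rw [e1]; exact h, rfl⟩ hmin (by omega)]; rfl
    · rw [pvMinPrio_eq (PySem.Str.lower label) 0 ⟨("mult", 0), by simp [pvKeywords], by rw [e2]; exact h, rfl⟩ hmin (by omega)]; rfl
  · rw [if_neg h0]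
    by_cases h1 : (b3 || (b4 || (b5 || (b6 || b7)))) = true
    · rw [if_pos h1]
      have hmin : ∀ wp ∈ pvKeywords, PySem.Str.isIn wp.1 (PySem.Str.lower label) = true → 1 ≤ wp.2 := by
        simp only [pvKeywords, List.forall_mem_cons, List.forall_mem_nil, e0, e1, e2, e3, e4, e5, e6, e7, e8, e9, e10, e11, e12, e13, e14, e15, e16, e17, e18, e19, e20, e21, e22, e23, e24, e25, e26, e27, e28, e29, e30, e31, e32, e33, e34, e35, e36, e37, e38, e39, e40, e41]
        simp_all
      simp only [Bool.or_eq_true] at h1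
      rcases h1 with h | h | h | h | h
      · rw [pvMinPrio_eq (PySem.Str.lower label) 1 ⟨("duration", 1), by simp [pvKeywords], by rw [e3]; exact h, rfl⟩ hmin (by omega)]; rfl
      · rw [pvMinPrio_eq (PySem.Str.lower label) 1 ⟨("time", 1), by simp [pvKeywords], by rw [e4]; exact h, rfl⟩ hmin (by omega)]; rfl
      · rw [pvMinPrio_eq (PySem.Str.lower label) 1 ⟨("window", 1), by simp [pvKeywords], by rw [e5]; exact h, rfl⟩ hmin (by omega)]; rfl
      · rw [pvMinPrio_eq (PySem.Str.lower label) 1 ⟨("active", 1), by simp [pvKeywords], by rw [e6]; exact h, rfl⟩ hmin (by omega)]; rfl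
      · rw [pvMinPrio_eq (PySem.Str.lower label) 1 ⟨("uptime", 1), by simp [pvKeywords], by rw [e7]; exact h, rfl⟩ hmin (by omega)]; rfl
    · rw [if_neg h1]
      by_cases h2 : (b8 || b9) = true
      · rw [if_pos h2]
        have hmin : ∀ wp ∈ pvKeywords, PySem.Str.isIn wp.1 (PySem.Str.lower label) = true → 2 ≤ wp.2 := by
          simp only [pvKeywords, List.forall_mem_cons, List.forall_mem_nil, e0, e1, e2, e3, e4, e5, e6, e7, e8, e9, e10, e11, e12, e13, e14, e15, e16, e17, e18, e19, e20, e21, e22, e23, e24, e25, e26, e27, e28, e29, e30, e31, e32, e33, e34, e35, e36, e37, e38, e39, e40, e41]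
          simp_all
        simp only [Bool.or_eq_true] at h2
        rcases h2 with h | h
        · rw [pvMinPrio_eq (PySem.Str.lower label) 2 ⟨("ult cost", 2), by simp [pvKeywords], by rw [e8]; exact h, rfl⟩ hmin (by omega)]; rfl
        · rw [pvMinPrio_eq (PySem.Str.lower label) 2 ⟨("ultimate cost", 2), by simp [pvKeywords], by rw [e9]; exact h, rfl⟩ hmin (by omega)]; rfl
      · rw [if_neg h2]
        by_cases h3 : (b10 || (b11 || b12)) = true
        · rw [if_pos h3]
          have hmin : ∀ wp ∈ pvKeywords, PySem.Str.isIn wp.1 (PySem.Str.lower label) = true → 3 ≤ wp.2 := by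
            simp only [pvKeywords, List.forall_mem_cons, List.forall_mem_nil, e0, e1, e2, e3, e4, e5, e6, e7, e8, e9, e10, e11, e12, e13, e14, e15, e16, e17, e18, e19, e20, e21, e22, e23, e24, e25, e26, e27, e28, e29, e30, e31, e32, e33, e34, e35, e36, e37, e38, e39, e40, e41]
            simp_all
          simp only [Bool.or_eq_true] at h3
          rcases h3 with h | h | h
          · rw [pvMinPrio_eq (PySem.Str.lower label) 3 ⟨("cost", 3), by simp [pvKeywords], by rw [e10]; exact h, rfl⟩ hmin (by omega)]; rfl
          · rw [pvMinPrio_eq (PySem.Str.lower label) 3 ⟨("credit", 3), by simp [pvKeywords], by rw [e11]; exact h, rfl⟩ hmin (by omega)]; rfl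
          · rw [pvMinPrio_eq (PySem.Str.lower label) 3 ⟨("price", 3), by simp [pvKeywords], by rw [e12]; exact h, rfl⟩ hmin (by omega)]; rfl
        · rw [if_neg h3]
          by_cases h4 : b13 = true
          · rw [if_pos h4]
            have hmin : ∀ wp ∈ pvKeywords, PySem.Str.isIn wp.1 (PySem.Str.lower label) = true → 4 ≤ wp.2 := by
              simp only [pvKeywords, List.forall_mem_cons, List.forall_mem_nil, e0, e1, e2, e3, e4, e5, e6, e7, e8, e9, e10, e11, e12, e13, e14, e15, e16, e17, e18, e19, e20, e21, e22, e23, e24, e25, e26, e27, e28, e29, e30, e31, e32, e33, e34, e35, e36, e37, e38, e39, e40, e41]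
              simp_all
            rw [pvMinPrio_eq (PySem.Str.lower label) 4 ⟨("charge", 4), by simp [pvKeywords], by rw [e13]; exact h4, rfl⟩ hmin (by omega)]; rfl
          · rw [if_neg h4]
            by_cases h5 : (b14 || (b15 || (b16 || b17))) = true
            · rw [if_pos h5]
              have hmin : ∀ wp ∈ pvKeywords, PySem.Str.isIn wp.1 (PySem.Str.lower label) = true → 5 ≤ wp.2 := by
                simp only [pvKeywords, List.forall_mem_cons, List.forall_mem_nil, e0, e1, e2, e3, e4, e5, e6, e7, e8, e9, e10, e11, e12, e13, e14, e15, e16, e17, e18, e19, e20, e21, e22, e23, e24, e25, e26, e27, e28, e29, e30, e31, e32, e33, e34, e35, e36, e37, e38, e39, e40, e41]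
                simp_all
              simp only [Bool.or_eq_true] at h5
              rcases h5 with h | h | h | h
              · rw [pvMinPrio_eq (PySem.Str.lower label) 5 ⟨("damage", 5), by simp [pvKeywords], by rw [e14]; exact h, rfl⟩ hmin (by omega)]; rfl
              · rw [pvMinPrio_eq (PySem.Str.lower label) 5 ⟨("dmg", 5), by simp [pvKeywords], by rw [e15]; exact h, rfl⟩ hmin (by omega)]; rfl
              · rw [pvMinPrio_eq (PySem.Str.lower label) 5 ⟨("dps", 5), by simp [pvKeywords], by rw [e16]; exact h, rfl⟩ hmin (by omega)]; rfl
              · rw [pvMinPrio_eq (PySem.Str.lower label) 5 ⟨("tick", 5), by simp [pvKeywords], by rw [e17]; exact h, rfl⟩ hmin (by omega)]; rfl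
            · rw [if_neg h5]
              by_cases h6 : (b18 || (b19 || b20)) = true
              · rw [if_pos h6]
                have hmin : ∀ wp ∈ pvKeywords, PySem.Str.isIn wp.1 (PySem.Str.lower label) = true → 6 ≤ wp.2 := by
                  simp only [pvKeywords, List.forall_mem_cons, List.forall_mem_nil, e0, e1, e2, e3, e4, e5, e6, e7, e8, e9, e10, e11, e12, e13, e14, e15, e16, e17, e18, e19, e20, e21, e22, e23, e24, e25, e26, e27, e28, e29, e30, e31, e32, e33, e34, e35, e36, e37, e38, e39, e40, e41]
                  simp_all
                simp only [Bool.or_eq_true] at h6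
                rcases h6 with h | h | h
                · rw [pvMinPrio_eq (PySem.Str.lower label) 6 ⟨("health", 6), by simp [pvKeywords], by rw [e18]; exact h, rfl⟩ hmin (by omega)]; rfl
                · rw [pvMinPrio_eq (PySem.Str.lower label) 6 ⟨("hp", 6), by simp [pvKeywords], by rw [e19]; exact h, rfl⟩ hmin (by omega)]; rfl
                · rw [pvMinPrio_eq (PySem.Str.lower label) 6 ⟨("heal", 6), by simp [pvKeywords], by rw [e20]; exact h, rfl⟩ hmin (by omega)]; rfl
              · rw [if_neg h6]
                by_cases h7 : b21 = true
                · rw [if_pos h7]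
                  have hmin : ∀ wp ∈ pvKeywords, PySem.Str.isIn wp.1 (PySem.Str.lower label) = true → 7 ≤ wp.2 := by
                    simp only [pvKeywords, List.forall_mem_cons, List.forall_mem_nil, e0, e1, e2, e3, e4, e5, e6, e7, e8, e9, e10, e11, e12, e13, e14, e15, e16, e17, e18, e19, e20, e21, e22, e23, e24, e25, e26, e27, e28, e29, e30, e31, e32, e33, e34, e35, e36, e37, e38, e39, e40, e41]
                    simp_all
                  rw [pvMinPrio_eq (PySem.Str.lower label) 7 ⟨("cooldown", 7), by simp [pvKeywords], by rw [e21]; exact h7, rfl⟩ hmin (by omega)]; rfl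
                · rw [if_neg h7]
                  by_cases h8 : (b22 || (b23 || (b24 || (b25 || (b26 || (b27 || (b28 || (b29 || (b30 || b31))))))))) = true
                  · rw [if_pos h8]
                    have hmin : ∀ wp ∈ pvKeywords, PySem.Str.isIn wp.1 (PySem.Str.lower label) = true → 8 ≤ wp.2 := by
                      simp only [pvKeywords, List.forall_mem_cons, List.forall_mem_nil, e0, e1, e2, e3, e4, e5, e6, e7, e8, e9, e10, e11, e12, e13, e14, e15, e16, e17, e18, e19, e20, e21, e22, e23, e24, e25, e26, e27, e28, e29, e30, e31, e32, e33, e34, e35, e36, e37, e38, e39, e40, e41]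
                      simp_all
                    simp only [Bool.or_eq_true] at h8
                    rcases h8 with h | h | h | h | h | h | h | h | h | h
                    · rw [pvMinPrio_eq (PySem.Str.lower label) 8 ⟨("range", 8), by simp [pvKeywords], by rw [e22]; exact h, rfl⟩ hmin (by omega)]; rfl
                    · rw [pvMinPrio_eq (PySem.Str.lower label) 8 ⟨("radius", 8), by simp [pvKeywords], by rw [e23]; exact h, rfl⟩ hmin (by omega)]; rfl
                    · rw [pvMinPrio_eq (PySem.Str.lower label) 8 ⟨("distance", 8), by simp [pvKeywords], by rw [e24]; exact h, rfl⟩ hmin (by omega)]; rfl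
                    · rw [pvMinPrio_eq (PySem.Str.lower label) 8 ⟨("size", 8), by simp [pvKeywords], by rw [e25]; exact h, rfl⟩ hmin (by omega)]; rfl
                    · rw [pvMinPrio_eq (PySem.Str.lower label) 8 ⟨("diameter", 8), by simp [pvKeywords], by rw [e26]; exact h, rfl⟩ hmin (by omega)]; rfl
                    · rw [pvMinPrio_eq (PySem.Str.lower label) 8 ⟨("length", 8), by simp [pvKeywords], by rw [e27]; exact h, rfl⟩ hmin (by omega)]; rfl
                    · rw [pvMinPrio_eq (PySem.Str.lower label) 8 ⟨("width", 8), by simp [pvKeywords], by rw [e28]; exact h, rfl⟩ hmin (by omega)]; rfl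
                    · rw [pvMinPrio_eq (PySem.Str.lower label) 8 ⟨("height", 8), by simp [pvKeywords], by rw [e29]; exact h, rfl⟩ hmin (by omega)]; rfl
                    · rw [pvMinPrio_eq (PySem.Str.lower label) 8 ⟨("killzone", 8), by simp [pvKeywords], by rw [e30]; exact h, rfl⟩ hmin (by omega)]; rfl
                    · rw [pvMinPrio_eq (PySem.Str.lower label) 8 ⟨("zone", 8), by simp [pvKeywords], by rw [e31]; exact h, rfl⟩ hmin (by omega)]; rfl
                  · rw [if_neg h8]
                    by_cases h9 : ((b32 || (b33 || b34)) && !b10) = true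
                    · rw [if_pos h9]
                      have hmin : ∀ wp ∈ pvKeywords, PySem.Str.isIn wp.1 (PySem.Str.lower label) = true → 9 ≤ wp.2 := by
                        simp only [pvKeywords, List.forall_mem_cons, List.forall_mem_nil, e0, e1, e2, e3, e4, e5, e6, e7, e8, e9, e10, e11, e12, e13, e14, e15, e16, e17, e18, e19, e20, e21, e22, e23, e24, e25, e26, e27, e28, e29, e30, e31, e32, e33, e34, e35, e36, e37, e38, e39, e40, e41]
                        simp_all
                      rw [Bool.and_eq_true] at h9
                      obtain ⟨hd, hc⟩ := h9
                      simp only [Bool.or_eq_true] at hd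
                      rcases hd with h | h | h
                      · rw [pvMinPrio_eq (PySem.Str.lower label) 9 ⟨("ult", 9), by simp [pvKeywords], by rw [e32]; exact h, rfl⟩ hmin (by omega)]; rfl
                      · rw [pvMinPrio_eq (PySem.Str.lower label) 9 ⟨("ultimate", 9), by simp [pvKeywords], by rw [e33]; exact h, rfl⟩ hmin (by omega)]; rfl
                      · rw [pvMinPrio_eq (PySem.Str.lower label) 9 ⟨("point", 9), by simp [pvKeywords], by rw [e34]; exact h, rfl⟩ hmin (by omega)]; rfl
                    · rw [if_neg h9]
                      by_cases h10 : (b35 || b36) = true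
                      · rw [if_pos h10]
                        have hmin : ∀ wp ∈ pvKeywords, PySem.Str.isIn wp.1 (PySem.Str.lower label) = true → 10 ≤ wp.2 := by
                          simp only [pvKeywords, List.forall_mem_cons, List.forall_mem_nil, e0, e1, e2, e3, e4, e5, e6, e7, e8, e9, e10, e11, e12, e13, e14, e15, e16, e17, e18, e19, e20, e21, e22, e23, e24, e25, e26, e27, e28, e29, e30, e31, e32, e33, e34, e35, e36, e37, e38, e39, e40, e41]
                          simp_all
                        simp only [Bool.or_eq_true] at h10
                        rcases h10 with h | h
                        · rw [pvMinPrio_eq (PySem.Str.lower label) 10 ⟨("speed", 10), by simp [pvKeywords], by rw [e35]; exact h, rfl⟩ hmin (by omega)]; rfl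
                        · rw [pvMinPrio_eq (PySem.Str.lower label) 10 ⟨("velocity", 10), by simp [pvKeywords], by rw [e36]; exact h, rfl⟩ hmin (by omega)]; rfl
                      · rw [if_neg h10]
                        by_cases h11 : b37 = true
                        · rw [if_pos h11]
                          have hmin : ∀ wp ∈ pvKeywords, PySem.Str.isIn wp.1 (PySem.Str.lower label) = true → 11 ≤ wp.2 := by
                            simp only [pvKeywords, List.forall_mem_cons, List.forall_mem_nil, e0, e1, e2, e3, e4, e5, e6, e7, e8, e9, e10, e11, e12, e13, e14, e15, e16, e17, e18, e19, e20, e21, e22, e23, e24, e25, e26, e27, e28, e29, e30, e31, e32, e33, e34, e35, e36, e37, e38, e39, e40, e41]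
                            simp_all
                          rw [pvMinPrio_eq (PySem.Str.lower label) 11 ⟨("delay", 11), by simp [pvKeywords], by rw [e37]; exact h11, rfl⟩ hmin (by omega)]; rfl
                        · rw [if_neg h11]
                          by_cases h12 : b38 = true
                          · rw [if_pos h12]
                            have hmin : ∀ wp ∈ pvKeywords, PySem.Str.isIn wp.1 (PySem.Str.lower label) = true → 12 ≤ wp.2 := by
                              simp only [pvKeywords, List.forall_mem_cons, List.forall_mem_nil, e0, e1, e2, e3, e4, e5, e6, e7, e8, e9, e10, e11, e12, e13, e14, e15, e16, e17, e18, e19, e20, e21, e22, e23, e24, e25, e26, e27, e28, e29, e30, e31, e32, e33, e34, e35, e36, e37, e38, e39, e40, e41]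
                              simp_all
                            rw [pvMinPrio_eq (PySem.Str.lower label) 12 ⟨("fortif", 12), by simp [pvKeywords], by rw [e38]; exact h12, rfl⟩ hmin (by omega)]; rfl
                          · rw [if_neg h12]
                            by_cases h13 : (b39 || b40 || b41) = true
                            · rw [if_pos h13]
                              have hmin : ∀ wp ∈ pvKeywords, PySem.Str.isIn wp.1 (PySem.Str.lower label) = true → 13 ≤ wp.2 := by
                                simp only [pvKeywords, List.forall_mem_cons, List.forall_mem_nil, e0, e1, e2, e3, e4, e5, e6, e7, e8, e9, e10, e11, e12, e13, e14, e15, e16, e17, e18, e19, e20, e21, e22, e23, e24, e25, e26, e27, e28, e29, e30, e31, e32, e33, e34, e35, e36, e37, e38, e39, e40, e41]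
                                simp_all
                              simp only [Bool.or_eq_true] at h13
                              rcases h13 with (h | h) | h
                              · rw [pvMinPrio_eq (PySem.Str.lower label) 13 ⟨("degree", 13), by simp [pvKeywords], by rw [e39]; exact h, rfl⟩ hmin (by omega)]; rfl
                              · rw [pvMinPrio_eq (PySem.Str.lower label) 13 ⟨("vision", 13), by simp [pvKeywords], by rw [e40]; exact h, rfl⟩ hmin (by omega)]; rfl
                              · rw [pvMinPrio_eq (PySem.Str.lower label) 13 ⟨("angle", 13), by simp [pvKeywords], by rw [e41]; exact h, rfl⟩ hmin (by omega)]; rfl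
                            · rw [if_neg h13]
                              rw [pvMinPrio_none (PySem.Str.lower label) (by
                                simp only [pvKeywords, List.forall_mem_cons, List.forall_mem_nil, e0, e1, e2, e3, e4, e5, e6, e7, e8, e9, e10, e11, e12, e13, e14, e15, e16, e17, e18, e19, e20, e21, e22, e23, e24, e25, e26, e27, e28, e29, e30, e31, e32, e33, e34, e35, e36, e37, e38, e39, e40, e41]
                                simp_all)]
                              rfl
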